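-- pv_equiv track=rewrite | github.com/vegraux/master_thesis | scripts/convenience/analyze.py | find_load_names
-- ===== SOURCE A (Python) =====
-- def find_load_names(sol_bus):
--     nr_sol = 1
--     nr_else = 1
--     load_names = []
--     for k in range(len(sol_bus)):
--         if sol_bus[k]:
--             load_names.append('sun {}'.format(nr_sol))
--             nr_sol += 1
--         else:
--             load_names.append('load {}'.format(nr_else))
--             nr_else += 1
--     return load_names
-- ===== SOURCE B (Python) =====
-- def find_load_names(sol_bus):
--     prefix = []
--     c = 0
--     for x in sol_bus:
--         c += 1 if x else 0
--         prefix.append(c)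
--     return ['sun {}'.format(p) if x else 'load {}'.format(k + 1 - p)
--             for k, (x, p) in enumerate(zip(sol_bus, prefix))]
-- ===== Notes on version B (the rewrite author's own statement) =====
-- stated objective: alternative
-- what changed: Replaces the two mutated running counters with a precomputed prefix-count table of truthy entries, then a second pass labels index k as 'sun prefix[k]' or 'load (k+1-prefix[k])'.
import Mathlib
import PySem

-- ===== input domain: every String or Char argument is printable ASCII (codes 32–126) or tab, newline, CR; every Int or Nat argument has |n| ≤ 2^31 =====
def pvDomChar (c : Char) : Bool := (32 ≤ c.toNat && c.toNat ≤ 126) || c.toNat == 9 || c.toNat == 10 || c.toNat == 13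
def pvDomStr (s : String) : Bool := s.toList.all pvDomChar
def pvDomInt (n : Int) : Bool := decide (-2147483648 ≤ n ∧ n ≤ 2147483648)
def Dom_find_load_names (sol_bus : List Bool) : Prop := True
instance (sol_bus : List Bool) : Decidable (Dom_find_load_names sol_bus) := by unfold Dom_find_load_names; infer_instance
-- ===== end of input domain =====

-- B replaces A's two mutated running counters with a precomputed prefix-count table
-- read in a second pass (alternative decomposition, same O(n) cost).


-- ===== PORT A =====
def find_load_names (sol_bus : List Bool) : List String :=
  ((PySem.List.pyRange 0 (sol_bus.length : Int) 1).foldl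
    (fun (st : Int × Int × List String) k =>
      if PySem.List.pyGetD sol_bus k false then
        (st.1 + 1, st.2.1, st.2.2 ++ ["sun " ++ PySem.Int.toStr st.1])
      else
        (st.1, st.2.1 + 1, st.2.2 ++ ["load " ++ PySem.Int.toStr st.2.1]))
    (1, 1, [])).2.2

-- ===== PORT B =====
def find_load_names_alt (sol_bus : List Bool) : List String :=
  let pref := (sol_bus.foldl
    (fun (st : Int × List Int) x =>
      let c := st.1 + (if x then 1 else 0)
      (c, st.2 ++ [c])) (0, [])).2
  (PySem.List.enumerate (sol_bus.zip pref)).map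
    (fun kp => if kp.2.1 then "sun " ++ PySem.Int.toStr kp.2.2
               else "load " ++ PySem.Int.toStr (kp.1 + 1 - kp.2.2))

-- ===== PRECONDITION & SPEC =====
def Spec_find_load_names (sol_bus : List Bool) (out : List String) : Prop := out = find_load_names_alt sol_bus
instance (sol_bus : List Bool) (out : List String) : Decidable (Spec_find_load_names sol_bus out) := by unfold Spec_find_load_names; infer_instance

-- ===== CLAIM (what is proved, stated in full; the proofs are below) =====
def Claim_equal_find_load_names : Prop := ∀ (sol_bus : List Bool), Dom_find_load_names sol_bus → Spec_find_load_names sol_bus (find_load_names sol_bus)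

-- ===== LEMMAS AND PROOFS =====

-- common recursive description of the labels, with running counters as parameters
def pvGo : List Bool → Int → Int → List String
  | [], _, _ => []
  | x :: xs, ns, ne =>
    if x then ("sun " ++ PySem.Int.toStr ns) :: pvGo xs (ns + 1) ne
    else ("load " ++ PySem.Int.toStr ne) :: pvGo xs ns (ne + 1)

-- structural form of B's prefix-count table
def pvPref : List Bool → Int → List Int
  | [], _ => []
  | x :: xs, c => (c + if x then 1 else 0) :: pvPref xs (c + if x then 1 else 0)

theorem pvA_fold (l : List Bool) : ∀ (ns ne : Int) (acc : List String),
    (l.foldl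
      (fun (st : Int × Int × List String) x =>
        if x then (st.1 + 1, st.2.1, st.2.2 ++ ["sun " ++ PySem.Int.toStr st.1])
        else (st.1, st.2.1 + 1, st.2.2 ++ ["load " ++ PySem.Int.toStr st.2.1]))
      (ns, ne, acc)).2.2 = acc ++ pvGo l ns ne := by
  induction l with
  | nil => intro ns ne acc; simp [pvGo]
  | cons x xs ih =>
    intro ns ne acc
    by_cases hx : x <;> simp [hx, pvGo, ih]

theorem pvPref_fold (l : List Bool) : ∀ (c : Int) (acc : List Int),
    (l.foldl
      (fun (st : Int × List Int) x =>
        let c := st.1 + (if x then 1 else 0)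
        (c, st.2 ++ [c])) (c, acc)).2 = acc ++ pvPref l c := by
  induction l with
  | nil => intro c acc; simp [pvPref]
  | cons x xs ih =>
    intro c acc
    by_cases hx : x <;> simp [hx, pvPref, ih]

theorem pvB_enum (l : List Bool) : ∀ (c s : Int),
    (PySem.List.enumerate (l.zip (pvPref l c)) s).map
      (fun kp => if kp.2.1 then "sun " ++ PySem.Int.toStr kp.2.2
                 else "load " ++ PySem.Int.toStr (kp.1 + 1 - kp.2.2))
      = pvGo l (c + 1) (s + 1 - c) := by
  induction l with
  | nil => intro c s; simp [pvPref, pvGo, PySem.List.enumerate_nil]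
  | cons x xs ih =>
    intro c s
    by_cases hx : x
    · simp [hx, pvPref, pvGo, PySem.List.enumerate_cons, ih]
    · simp [hx, pvPref, pvGo, PySem.List.enumerate_cons, ih]
      congr 1
      omega

-- ===== VERDICT (by name: the statement is the Claim_ definition above) =====
theorem find_load_names_spec : Claim_equal_find_load_names := by
  intro l _
  show find_load_names l = find_load_names_alt l
  unfold find_load_names find_load_names_alt
  rw [PySem.List.foldl_pyRange_zero_pyGetD' l false
    (fun (st : Int × Int × List String) x =>
      if x then (st.1 + 1, st.2.1, st.2.2 ++ ["sun " ++ PySem.Int.toStr st.1])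
      else (st.1, st.2.1 + 1, st.2.2 ++ ["load " ++ PySem.Int.toStr st.2.1])) (1, 1, [])]
  rw [pvA_fold, pvPref_fold]
  simp only [List.nil_append]
  rw [pvB_enum]
  norm_num
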